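-- pv_equiv track=rewrite | github.com/OWASP/Nettacker | nettacker/core/utils/ports.py | parse_port_expression
-- ===== SOURCE A (Python) =====
-- from typing import List
--
-- def parse_port_expression(expression: str) -> List[int]:
--     """
--     Parse a port expression string like:
--     '80'
--     '80,443'
--     '20-22'
--     '20-22,80,443'
--
--     Returns a sorted list of unique ports.
--     Raises ValueError for invalid inputs.
--     """
--     if not expression:
--         return []
--
--     ports = set()
--
--     for part in expression.split(","):
--         part = part.strip()
--
--         if "-" in part:
--             try:
--                 start, end = map(int, part.split("-"))
--             except ValueError:
--                 raise ValueError(f"Invalid port range: {part}")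
--
--             if start > end:
--                 raise ValueError(f"Invalid port range: {part}")
--
--             if start < 1 or end > 65535:
--                 raise ValueError(f"Port out of range: {part}")
--
--             for port in range(start, end + 1):
--                 ports.add(port)
--
--         else:
--             try:
--                 port = int(part)
--             except ValueError:
--                 raise ValueError(f"Invalid port value: {part}")
--
--             if port < 1 or port > 65535:
--                 raise ValueError(f"Port out of range: {port}")
--
--             ports.add(port)
--
--     return sorted(ports)
-- ===== SOURCE B (Python) =====
-- def _part_interval(part):
--     part = part.strip()
--     if "-" in part:
--         try:
--             start, end = map(int, part.split("-"))
--         except ValueError: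
--             raise ValueError(f"Invalid port range: {part}")
--         if start > end:
--             raise ValueError(f"Invalid port range: {part}")
--         if start < 1 or end > 65535:
--             raise ValueError(f"Port out of range: {part}")
--         return (start, end)
--     try:
--         port = int(part)
--     except ValueError:
--         raise ValueError(f"Invalid port value: {part}")
--     if port < 1 or port > 65535:
--         raise ValueError(f"Port out of range: {port}")
--     return (port, port)
--
--
-- def parse_port_expression(expression):
--     if not expression:
--         return []
--     intervals = sorted((_part_interval(p) for p in expression.split(",")),
--                        key=lambda t: t[0])
--     merged = []
--     for lo, hi in intervals:
--         if merged and lo <= merged[-1][1] + 1: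
--             last = merged[-1]
--             merged[-1] = (last[0], max(last[1], hi))
--         else:
--             merged.append((lo, hi))
--     out = []
--     for lo, hi in merged:
--         out.extend(range(lo, hi + 1))
--     return out
-- ===== Notes on version B (the rewrite author's own statement) =====
-- stated objective: alternative
-- what changed: B builds normalized (lo,hi) interval tuples per comma-part, sorts the intervals by start, merges overlapping/adjacent intervals in one sweep and expands the merged intervals, instead of A's dedup set of every individual port followed by sorting all ports.
import Mathlib
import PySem

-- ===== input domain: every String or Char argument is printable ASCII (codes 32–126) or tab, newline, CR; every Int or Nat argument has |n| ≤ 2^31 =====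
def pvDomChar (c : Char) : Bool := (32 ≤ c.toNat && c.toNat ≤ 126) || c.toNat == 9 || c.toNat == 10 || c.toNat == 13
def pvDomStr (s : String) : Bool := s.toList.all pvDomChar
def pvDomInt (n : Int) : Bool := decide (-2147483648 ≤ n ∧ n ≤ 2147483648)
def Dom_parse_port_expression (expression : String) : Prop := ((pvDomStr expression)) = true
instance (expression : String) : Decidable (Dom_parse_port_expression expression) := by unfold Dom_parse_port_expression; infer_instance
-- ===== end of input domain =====

-- B replaces A's per-port dedup set + final sort by normalized (lo,hi) intervals, sorted by start,
-- merged in one sweep and then expanded (objective: alternative algorithm; equal return value on all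
-- inputs where A returns — Pre_ excludes exactly the inputs where A raises ValueError).

-- ===== PORT A =====
-- one iteration of A's for-loop; 'none' = the ValueError paths (excluded by Pre_)
def pvAStep (acc : Option (PySem.Set Int)) (part : List Char) : Option (PySem.Set Int) :=
  match acc with
  | none => none
  | some ports =>
    let part := PySem.Chars.strip part
    if PySem.Chars.isIn ['-'] part then
      match (PySem.Chars.splitOn part ['-']).map PySem.Int.ofChars? with
      | [some start, some stop] =>
        if start > stop then none
        else if start < 1 ∨ stop > 65535 then none
        else some ((PySem.List.pyRange start (stop + 1) 1).foldl (fun s p => s.add p) ports)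
      | _ => none
    else
      match PySem.Int.ofChars? part with
      | none => none
      | some port =>
        if port < 1 ∨ port > 65535 then none else some (ports.add port)

def parse_port_expression (expression : String) : List Int :=
  if expression.toList = [] then []
  else
    match (PySem.Chars.splitOn expression.toList [',']).foldl pvAStep (some PySem.Set.empty) with
    | none => []          -- ValueError raised: outside Pre_
    | some ports => PySem.List.sorted ports (fun x => x)

-- ===== PORT B =====
-- Source B's _part_interval: a part as a normalized (lo, hi) interval; 'none' = the ValueError paths
def pvPartInterval (part : List Char) : Option (Int × Int) :=
  let part := PySem.Chars.strip part
  if PySem.Chars.isIn ['-'] part then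
    match (PySem.Chars.splitOn part ['-']).map PySem.Int.ofChars? with
    | [some start, some stop] =>
      if start > stop then none
      else if start < 1 ∨ stop > 65535 then none
      else some (start, stop)
    | _ => none
  else
    match PySem.Int.ofChars? part with
    | none => none
    | some port =>
      if port < 1 ∨ port > 65535 then none else some (port, port)

def pvBStep (acc : Option (List (Int × Int))) (part : List Char) : Option (List (Int × Int)) :=
  match acc, pvPartInterval part with
  | some ivs, some iv => some (ivs ++ [iv])
  | _, _ => none

def pvCollect (parts : List (List Char)) : Option (List (Int × Int)) :=
  parts.foldl pvBStep (some [])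

-- one iteration of Source B's merge sweep (merged[-1] is the list's last element)
def pvMergeStep (merged : List (Int × Int)) (iv : Int × Int) : List (Int × Int) :=
  match merged.getLast? with
  | none => merged ++ [iv]
  | some last =>
    if iv.1 ≤ last.2 + 1 then merged.dropLast ++ [(last.1, max last.2 iv.2)]
    else merged ++ [iv]

def parse_port_expression_alt (expression : String) : List Int :=
  if expression.toList = [] then []
  else
    match pvCollect (PySem.Chars.splitOn expression.toList [',']) with
    | none => []          -- ValueError raised: outside Pre_
    | some intervals =>
      let merged := (PySem.List.sorted intervals (fun t => t.1)).foldl pvMergeStep []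
      merged.foldl (fun out iv => out ++ PySem.List.pyRange iv.1 (iv.2 + 1) 1) []

-- ===== PRECONDITION & SPEC =====
-- a comma-part on which neither int() nor the range/bound checks raise ValueError
def pvValidPart (part : List Char) : Bool :=
  let p := PySem.Chars.strip part
  if PySem.Chars.isIn ['-'] p then
    match (PySem.Chars.splitOn p ['-']).map PySem.Int.ofChars? with
    | [some s, some e] => decide (s ≤ e ∧ 1 ≤ s ∧ e ≤ 65535)
    | _ => false
  else
    match PySem.Int.ofChars? p with
    | some v => decide (1 ≤ v ∧ v ≤ 65535)
    | none => false

-- Pre_ excludes exactly the inputs on which A raises ValueError: some comma-part is not an int or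
-- an int range, or has a port outside 1..65535, or is an inverted range.
def Pre_parse_port_expression (expression : String) : Prop :=
  expression.toList = [] ∨
    ∀ part ∈ PySem.Chars.splitOn expression.toList [','], pvValidPart part = true
instance (expression : String) : Decidable (Pre_parse_port_expression expression) := by
  unfold Pre_parse_port_expression; infer_instance

def pvWitness_parse_port_expression : String := "20-22,80,443,21-23"

def Spec_parse_port_expression (expression : String) (out : List Int) : Prop := out = parse_port_expression_alt expression
instance (expression : String) (out : List Int) : Decidable (Spec_parse_port_expression expression out) := by unfold Spec_parse_port_expression; infer_instance

-- ===== CLAIM (what is proved, stated in full; the proofs are below) =====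
def Claim_equal_parse_port_expression : Prop := ∀ (expression : String), Dom_parse_port_expression expression → Pre_parse_port_expression expression → Spec_parse_port_expression expression (parse_port_expression expression)

-- ===== LEMMAS AND PROOFS =====

theorem pvAStep_eq (ports : PySem.Set Int) (part : List Char) :
    pvAStep (some ports) part =
      match pvPartInterval part with
      | none => none
      | some iv => some ((PySem.List.pyRange iv.1 (iv.2 + 1) 1).foldl (fun s p => s.add p) ports) := by
  simp only [pvAStep, pvPartInterval]
  by_cases hin : PySem.Chars.isIn ['-'] (PySem.Chars.strip part) = true
  · rw [if_pos hin, if_pos hin]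
    rcases hm : (PySem.Chars.splitOn (PySem.Chars.strip part) ['-']).map PySem.Int.ofChars? with
      _ | ⟨_ | a, _ | ⟨_ | b, _ | c⟩⟩ <;> (dsimp only; try rfl)
    split_ifs <;> rfl
  · rw [if_neg hin, if_neg hin]
    cases ho : PySem.Int.ofChars? (PySem.Chars.strip part) with
    | none => rfl
    | some v =>
      dsimp only
      split_ifs with h
      · rfl
      · dsimp only
        rw [PySem.List.pyRange_one_singleton]
        rfl

theorem pvPartInterval_of_valid {part : List Char} (h : pvValidPart part = true) :
    ∃ lo hi, pvPartInterval part = some (lo, hi) ∧ 1 ≤ lo ∧ lo ≤ hi ∧ hi ≤ 65535 := by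
  unfold pvValidPart at h
  simp only [pvPartInterval]
  by_cases hin : PySem.Chars.isIn ['-'] (PySem.Chars.strip part) = true
  · rw [if_pos hin] at h ⊢
    rcases hm : (PySem.Chars.splitOn (PySem.Chars.strip part) ['-']).map PySem.Int.ofChars? with
      _ | ⟨_ | a, _ | ⟨_ | b, _ | c⟩⟩ <;> simp only [hm] at h ⊢ <;>
        try exact Bool.noConfusion h
    rw [decide_eq_true_iff] at h
    refine ⟨a, b, ?_, by omega, by omega, by omega⟩
    dsimp only
    rw [if_neg (by omega), if_neg (by omega)]
  · rw [if_neg hin] at h ⊢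
    cases ho : PySem.Int.ofChars? (PySem.Chars.strip part) with
    | none => simp only [ho] at h; exact Bool.noConfusion h
    | some v =>
      simp only [ho] at h ⊢
      rw [decide_eq_true_iff] at h
      refine ⟨v, v, ?_, by omega, by omega, by omega⟩
      dsimp only
      rw [if_neg (by omega)]
theorem pvNodup_foldl_add (l : List Int) (s : PySem.Set Int) (h : s.Nodup) :
    (l.foldl (fun s p => PySem.Set.add s p) s).Nodup := by
  induction l generalizing s with
  | nil => exact h
  | cons x l ih => exact ih _ (PySem.Set.nodup_add s x h)

theorem pvCollect_vs_aset : ∀ (parts : List (List Char)) (ports : PySem.Set Int) (ivs : List (Int × Int)),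
    (∀ p ∈ parts, pvValidPart p = true) →
    ports.Nodup →
    (∀ x, x ∈ ports ↔ ∃ iv ∈ ivs, iv.1 ≤ x ∧ x ≤ iv.2) →
    (∀ iv ∈ ivs, 1 ≤ iv.1 ∧ iv.1 ≤ iv.2 ∧ iv.2 ≤ 65535) →
    ∃ ports' ivs', parts.foldl pvAStep (some ports) = some ports'
      ∧ parts.foldl pvBStep (some ivs) = some ivs'
      ∧ ports'.Nodup
      ∧ (∀ x, x ∈ ports' ↔ ∃ iv ∈ ivs', iv.1 ≤ x ∧ x ≤ iv.2)
      ∧ (∀ iv ∈ ivs', 1 ≤ iv.1 ∧ iv.1 ≤ iv.2 ∧ iv.2 ≤ 65535) := by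
  intro parts
  induction parts with
  | nil =>
    intro ports ivs _ hnd hmem hbnd
    exact ⟨ports, ivs, rfl, rfl, hnd, hmem, hbnd⟩
  | cons part rest ih =>
    intro ports ivs hvalid hnd hmem hbnd
    obtain ⟨lo, hi, hpi, h1, h2, h3⟩ := pvPartInterval_of_valid (hvalid part (by simp))
    have hstepA : pvAStep (some ports) part
        = some ((PySem.List.pyRange lo (hi + 1) 1).foldl (fun s p => s.add p) ports) := by
      rw [pvAStep_eq, hpi]
    have hstepB : pvBStep (some ivs) part = some (ivs ++ [(lo, hi)]) := by
      simp [pvBStep, hpi]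
    simp only [List.foldl_cons, hstepA, hstepB]
    apply ih
    · intro p hp; exact hvalid p (by simp [hp])
    · exact pvNodup_foldl_add _ _ hnd
    · intro x
      rw [PySem.Set.mem_foldl_add]
      simp only [PySem.List.mem_pyRange_one, hmem x, List.mem_append, List.mem_singleton]
      constructor
      · rintro (⟨iv, hiv, hc⟩ | ⟨b, hb, rfl⟩)
        · exact ⟨iv, Or.inl hiv, hc⟩
        · exact ⟨(lo, hi), Or.inr rfl, by omega⟩
      · rintro ⟨iv, hiv | rfl, hc⟩
        · exact Or.inl ⟨iv, hiv, hc⟩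
        · exact Or.inr ⟨x, by omega, rfl⟩
    · intro iv hiv
      rcases List.mem_append.mp hiv with h | h
      · exact hbnd iv h
      · rw [List.mem_singleton.mp h]; exact ⟨h1, h2, h3⟩
theorem pvMerge_fold : ∀ (l merged : List (Int × Int)),
    l.Pairwise (fun a b => a.1 ≤ b.1) →
    (∀ iv ∈ l, iv.1 ≤ iv.2) →
    merged.Pairwise (fun a b => a.2 + 1 < b.1) →
    (∀ iv ∈ merged, iv.1 ≤ iv.2) →
    (∀ iv ∈ merged, ∀ j ∈ l, iv.1 ≤ j.1) →
    (l.foldl pvMergeStep merged).Pairwise (fun a b => a.2 + 1 < b.1)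
      ∧ (∀ iv ∈ l.foldl pvMergeStep merged, iv.1 ≤ iv.2)
      ∧ (∀ x, (∃ iv ∈ l.foldl pvMergeStep merged, iv.1 ≤ x ∧ x ≤ iv.2) ↔
          (∃ iv ∈ merged, iv.1 ≤ x ∧ x ≤ iv.2) ∨ ∃ iv ∈ l, iv.1 ≤ x ∧ x ≤ iv.2) := by
  intro l
  induction l with
  | nil =>
    intro merged _ _ hgap hle _
    refine ⟨hgap, hle, fun x => ?_⟩
    simp
  | cons iv rest ih =>
    intro merged hsorted hliv hgap hle hlo
    have hivle : iv.1 ≤ iv.2 := hliv iv (by simp)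
    have hrest_sorted := (List.pairwise_cons.mp hsorted).2
    have hhead := (List.pairwise_cons.mp hsorted).1
    simp only [List.foldl_cons]
    -- analyse one merge step
    rcases List.eq_nil_or_concat' merged with rfl | ⟨ms, last, rfl⟩
    · have hstep : pvMergeStep [] iv = [iv] := by simp [pvMergeStep]
      rw [hstep]
      obtain ⟨g1, g2, g3⟩ := ih [iv] hrest_sorted (fun j hj => hliv j (by simp [hj]))
        (by simp) (by simpa using hivle)
        (by intro a ha j hj; simp at ha; subst ha; exact hhead j hj)
      refine ⟨g1, g2, fun x => ?_⟩
      rw [g3 x]; simp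
    · have hlast_le : last.1 ≤ last.2 := hle last (by simp)
      have hms_gap : ∀ a ∈ ms, a.2 + 1 < last.1 := by
        intro a ha
        have := (List.pairwise_append.mp hgap).2.2
        exact this a ha last (by simp)
      have hms_pw : ms.Pairwise (fun a b => a.2 + 1 < b.1) := (List.pairwise_append.mp hgap).1
      have hlast_lo : last.1 ≤ iv.1 := hlo last (by simp) iv (by simp)
      by_cases hmerge : iv.1 ≤ last.2 + 1
      · have hstep : pvMergeStep (ms ++ [last]) iv = ms ++ [(last.1, max last.2 iv.2)] := by
          simp [pvMergeStep, hmerge]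
        rw [hstep]
        obtain ⟨g1, g2, g3⟩ := ih (ms ++ [(last.1, max last.2 iv.2)]) hrest_sorted
          (fun j hj => hliv j (by simp [hj]))
          (by
            rw [List.pairwise_append]
            exact ⟨hms_pw, List.pairwise_singleton _ _,
              fun a ha b hb => by simp at hb; subst hb; exact hms_gap a ha⟩)
          (by
            intro a ha
            rcases List.mem_append.mp ha with h | h
            · exact hle a (by simp [h])
            · simp at h; subst h; simp; omega)
          (by
            intro a ha j hj
            rcases List.mem_append.mp ha with h | h
            · exact hlo a (by simp [h]) j (by simp [hj])
            · simp at h; subst h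
              exact le_trans hlast_lo (hhead j hj))
        refine ⟨g1, g2, fun x => ?_⟩
        rw [g3 x]
        constructor
        · rintro (⟨b, hb, hc⟩ | ⟨b, hb, hc⟩)
          · rcases List.mem_append.mp hb with h' | h'
            · exact Or.inl ⟨b, List.mem_append.mpr (Or.inl h'), hc⟩
            · simp only [List.mem_singleton] at h'
              rw [h'] at hc; dsimp only at hc
              rcases le_or_gt x last.2 with hx | hx
              · exact Or.inl ⟨last, List.mem_append.mpr (Or.inr (by simp)), by omega⟩
              · refine Or.inr ⟨iv, List.mem_cons_self .., by
                  rcases max_choice last.2 iv.2 with hM | hM <;> rw [hM] at hc <;> omega⟩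
          · exact Or.inr ⟨b, List.mem_cons_of_mem _ hb, hc⟩
        · rintro (⟨b, hb, hc⟩ | ⟨b, hb, hc⟩)
          · rcases List.mem_append.mp hb with h' | h'
            · exact Or.inl ⟨b, List.mem_append.mpr (Or.inl h'), hc⟩
            · simp only [List.mem_singleton] at h'
              rw [h'] at hc
              refine Or.inl ⟨(last.1, max last.2 iv.2), List.mem_append.mpr (Or.inr (by simp)), by
                dsimp only
                rcases max_choice last.2 iv.2 with hM | hM <;> rw [hM] <;> omega⟩
          · rcases List.mem_cons.mp hb with h' | h'
            · rw [h'] at hc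
              refine Or.inl ⟨(last.1, max last.2 iv.2), List.mem_append.mpr (Or.inr (by simp)), by
                dsimp only
                rcases max_choice last.2 iv.2 with hM | hM <;> rw [hM] <;> omega⟩
            · exact Or.inr ⟨b, h', hc⟩
      · have hstep : pvMergeStep (ms ++ [last]) iv = (ms ++ [last]) ++ [iv] := by
          simp [pvMergeStep, hmerge]
        rw [hstep]
        obtain ⟨g1, g2, g3⟩ := ih ((ms ++ [last]) ++ [iv]) hrest_sorted
          (fun j hj => hliv j (by simp [hj]))
          (by
            rw [List.pairwise_append]
            refine ⟨hgap, List.pairwise_singleton _ _, ?_⟩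
            intro a ha b hb
            simp at hb; subst hb
            rcases List.mem_append.mp ha with h | h
            · have := hms_gap a h; omega
            · simp at h; subst h; omega)
          (by
            intro a ha
            rcases List.mem_append.mp ha with h | h
            · exact hle a h
            · simp at h; subst h; exact hivle)
          (by
            intro a ha j hj
            rcases List.mem_append.mp ha with h | h
            · exact hlo a h j (by simp [hj])
            · simp at h; subst h; exact hhead j hj)
        refine ⟨g1, g2, fun x => ?_⟩
        rw [g3 x]
        constructor
        · rintro (⟨b, hb, hc⟩ | ⟨b, hb, hc⟩)
          · rcases List.mem_append.mp hb with h' | h'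
            · exact Or.inl ⟨b, h', hc⟩
            · simp only [List.mem_singleton] at h'
              rw [h'] at hc
              exact Or.inr ⟨iv, List.mem_cons_self .., hc⟩
          · exact Or.inr ⟨b, List.mem_cons_of_mem _ hb, hc⟩
        · rintro (⟨b, hb, hc⟩ | ⟨b, hb, hc⟩)
          · exact Or.inl ⟨b, List.mem_append.mpr (Or.inl hb), hc⟩
          · rcases List.mem_cons.mp hb with h' | h'
            · rw [h'] at hc
              exact Or.inl ⟨iv, List.mem_append.mpr (Or.inr (by simp)), hc⟩
            · exact Or.inr ⟨b, h', hc⟩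
theorem pvExpand (R : List (Int × Int))
    (hgap : R.Pairwise (fun a b => a.2 + 1 < b.1)) (hle : ∀ iv ∈ R, iv.1 ≤ iv.2) :
    (R.flatMap (fun iv => PySem.List.pyRange iv.1 (iv.2 + 1) 1)).Pairwise (· < ·)
      ∧ ∀ x, x ∈ R.flatMap (fun iv => PySem.List.pyRange iv.1 (iv.2 + 1) 1) ↔
          ∃ iv ∈ R, iv.1 ≤ x ∧ x ≤ iv.2 := by
  constructor
  · induction R with
    | nil => simp
    | cons iv rest ih =>
      rw [List.flatMap_cons, List.pairwise_append]
      refine ⟨PySem.List.pairwise_lt_pyRange_one _ _,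
        ih (List.pairwise_cons.mp hgap).2 (fun j hj => hle j (by simp [hj])), ?_⟩
      intro a ha y hy
      rw [PySem.List.mem_pyRange_one] at ha
      rw [List.mem_flatMap] at hy
      obtain ⟨jv, hjv, hyr⟩ := hy
      rw [PySem.List.mem_pyRange_one] at hyr
      have := (List.pairwise_cons.mp hgap).1 jv hjv
      omega
  · intro x
    rw [List.mem_flatMap]
    constructor
    · rintro ⟨iv, hiv, hx⟩
      rw [PySem.List.mem_pyRange_one] at hx
      exact ⟨iv, hiv, by omega⟩
    · rintro ⟨iv, hiv, hx⟩
      exact ⟨iv, hiv, by rw [PySem.List.mem_pyRange_one]; omega⟩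

theorem pvMain : ∀ (expression : String), Pre_parse_port_expression expression → parse_port_expression expression = parse_port_expression_alt expression := by
  intro expr hpre
  by_cases hemp : expr.toList = []
  · simp [parse_port_expression, parse_port_expression_alt, hemp]
  · rcases hpre with h | hvalid
    · exact absurd h hemp
    unfold parse_port_expression parse_port_expression_alt
    rw [if_neg hemp, if_neg hemp]
    obtain ⟨ports', ivs', hA, hB, hnd, hmem, hbnd⟩ :=
      pvCollect_vs_aset (PySem.Chars.splitOn expr.toList [',']) PySem.Set.empty []
        hvalid (by simp [PySem.Set.empty]) (by simp [PySem.Set.empty]) (by simp)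
    rw [hA]
    have hBc : pvCollect (PySem.Chars.splitOn expr.toList [',']) = some ivs' := hB
    rw [hBc]
    dsimp only
    -- B side: sorted intervals
    set sortedIvs := PySem.List.sorted ivs' (fun t => t.1) with hs
    have hperm : sortedIvs.Perm ivs' := PySem.List.sorted_perm _ _ _
    have hsorted : sortedIvs.Pairwise (fun a b => a.1 ≤ b.1) := PySem.List.sorted_pairwise _ _
    have hbnds : ∀ iv ∈ sortedIvs, 1 ≤ iv.1 ∧ iv.1 ≤ iv.2 ∧ iv.2 ≤ 65535 :=
      fun iv hiv => hbnd iv (hperm.mem_iff.mp hiv)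
    obtain ⟨g1, g2, g3⟩ := pvMerge_fold sortedIvs [] hsorted
      (fun iv hiv => (hbnds iv hiv).2.1) (by simp) (by simp) (by simp)
    obtain ⟨e1, e2⟩ := pvExpand _ g1 g2
    -- B's output loop is the flatMap
    rw [PySem.List.foldl_append_eq_flatMap]
    rw [List.nil_append]
    -- A's sorted set equals B's expansion
    apply PySem.List.sorted_eq_of_perm_of_pairwise_lt
    · apply (List.perm_ext_iff_of_nodup ?_ hnd).mpr
      · intro a
        rw [e2 a, hmem a, g3 a]
        simp [hperm.mem_iff]
      · exact e1.imp (fun h => ne_of_lt h)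
    · exact e1

-- ===== VERDICT (by name: the statement is the Claim_ definition above) =====
theorem parse_port_expression_spec : Claim_equal_parse_port_expression := by
  intro expression _ hpre
  exact pvMain expression hpre
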